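-- pv_equiv track=rewrite | github.com/SainsburyWellcomeCentre/hypnose-analysis | src/hypnose_analysis/utils/pred_seq_utils.py | _order_sequence_labels
-- ===== SOURCE A (Python) =====
-- def _order_sequence_labels(groups):
-- 	preferred = ["F-G-A", "E-D-A", "E-D-B", "C-G-B"]
-- 	labels = []
-- 	for name in preferred:
-- 		if name in groups:
-- 			labels.append(name)
-- 	for name in groups:
-- 		if name not in labels:
-- 			labels.append(name)
-- 	return labels
-- ===== SOURCE B (Python) =====
-- def _order_sequence_labels(groups):
-- 	preferred = ["F-G-A", "E-D-A", "E-D-B", "C-G-B"]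
-- 	rank = {name: i for i, name in enumerate(preferred)}
-- 	buckets = [[] for _ in range(len(preferred) + 1)]
-- 	for name in dict.fromkeys(groups):
-- 		buckets[rank.get(name, len(preferred))].append(name)
-- 	return [name for bucket in buckets for name in bucket]
-- ===== Notes on version B (the rewrite author's own statement) =====
-- stated objective: idiomatic
-- what changed: Replaces A's two passes with repeated list-membership scans by a rank table {name: i}, dict.fromkeys deduplication, and a single bucket-distribution pass whose concatenation yields the same order.
import Mathlib
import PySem

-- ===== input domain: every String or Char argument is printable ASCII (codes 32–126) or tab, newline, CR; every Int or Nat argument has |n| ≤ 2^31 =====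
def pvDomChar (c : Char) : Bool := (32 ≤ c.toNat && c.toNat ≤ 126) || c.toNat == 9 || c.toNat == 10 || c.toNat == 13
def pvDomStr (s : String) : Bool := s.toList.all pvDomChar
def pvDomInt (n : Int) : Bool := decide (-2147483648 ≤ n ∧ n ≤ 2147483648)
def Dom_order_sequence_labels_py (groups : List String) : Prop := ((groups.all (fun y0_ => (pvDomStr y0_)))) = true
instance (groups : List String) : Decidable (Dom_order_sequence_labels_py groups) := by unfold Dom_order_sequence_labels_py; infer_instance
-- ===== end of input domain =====

-- B replaces A's two membership-scanning passes by a rank table plus one bucket-distribution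
-- pass over the deduplicated input (same return value, different algorithm).

-- ===== PORT A =====
def order_sequence_labels_py (groups : List String) : List String :=
  let preferred : List String := ["F-G-A", "E-D-A", "E-D-B", "C-G-B"]
  let labels : List String :=
    preferred.foldl (fun labels name => if name ∈ groups then labels ++ [name] else labels) []
  groups.foldl (fun labels name => if name ∈ labels then labels else labels ++ [name]) labels

-- ===== PORT B =====
-- B-side helper: rank = {name: i for i, name in enumerate(preferred)}
def pvRank : PySem.Dict String Int :=
  (PySem.List.enumerate ["F-G-A", "E-D-A", "E-D-B", "C-G-B"]).foldl
    (fun d p => d.insert p.2 p.1) PySem.Dict.empty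

def order_sequence_labels_py_alt (groups : List String) : List String :=
  let preferred : List String := ["F-G-A", "E-D-A", "E-D-B", "C-G-B"]
  let buckets0 : List (List String) := List.replicate (preferred.length + 1) []
  let buckets := (PySem.List.dedup groups).foldl
    (fun bs name =>
      let k := (pvRank.getD name (preferred.length : Int)).toNat
      bs.set k (bs.getD k [] ++ [name])) buckets0
  buckets.foldl (fun acc bucket => acc ++ bucket) []

-- ===== PRECONDITION & SPEC =====
def Spec_order_sequence_labels_py (groups : List String) (out : List String) : Prop := out = order_sequence_labels_py_alt groups
instance (groups : List String) (out : List String) : Decidable (Spec_order_sequence_labels_py groups out) := by unfold Spec_order_sequence_labels_py; infer_instance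

-- ===== CLAIM (what is proved, stated in full; the proofs are below) =====
def Claim_equal_order_sequence_labels_py : Prop := ∀ (groups : List String), Dom_order_sequence_labels_py groups → Spec_order_sequence_labels_py groups (order_sequence_labels_py groups)

-- ===== LEMMAS AND PROOFS =====

-- ordered first-occurrence deduplication, structurally
def dd : List String → List String
  | [] => []
  | n :: t => n :: dd (t.filter (fun x => x ≠ n))
termination_by l => l.length
decreasing_by
  simp only [List.length_cons, List.length_unattach]
  exact Nat.lt_succ_of_le (le_trans (List.length_filter_le _ _) (by simp))

def rnk (n : String) : Nat :=
  if n = "F-G-A" then 0 else if n = "E-D-A" then 1 else if n = "E-D-B" then 2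
  else if n = "C-G-B" then 3 else 4

def filt (i : Nat) (l : List String) : List String := l.filter (fun n => decide (rnk n = i))

def bstep (bs : List (List String)) (name : String) : List (List String) :=
  bs.set (rnk name) (bs.getD (rnk name) [] ++ [name])

lemma filter_comm (p q : String → Bool) (l : List String) :
    (l.filter p).filter q = (l.filter q).filter p := by
  rw [List.filter_filter, List.filter_filter]
  apply List.filter_congr
  intro x _
  exact Bool.and_comm _ _

lemma foldl_pref (groups : List String) :
    ∀ (l init : List String),
      l.foldl (fun labels name => if name ∈ groups then labels ++ [name] else labels) init
        = init ++ l.filter (fun n => decide (n ∈ groups)) := by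
  intro l
  induction l with
  | nil => simp
  | cons n t ih =>
    intro init
    by_cases h : n ∈ groups <;> simp [List.foldl_cons, h, ih]

lemma foldl_dedup :
    ∀ (l seen : List String),
      l.foldl (fun labels name => if name ∈ labels then labels else labels ++ [name]) seen
        = seen ++ dd (l.filter (fun x => !decide (x ∈ seen))) := by
  intro l
  induction l with
  | nil => simp [dd]
  | cons n t ih =>
    intro seen
    by_cases h : n ∈ seen
    · simp [List.foldl_cons, h, ih]
    · simp only [List.foldl_cons, if_neg h, ih, List.filter_cons]
      simp [h, dd]
      congr 1
      apply List.filter_congr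
      intro x _
      exact Bool.and_comm _ _

lemma dedup_eq_dd (l : List String) : PySem.List.dedup l = dd l := by
  have h1 : PySem.List.dedup l
      = l.foldl (fun labels name => if name ∈ labels then labels else labels ++ [name]) [] := by
    rw [PySem.List.dedup_eq_ofList, PySem.Set.ofList_eq_foldl]
    apply PySem.List.foldl_congr_mem
    intro acc x _
    simp [PySem.Set.add, PySem.Set.contains]
  rw [h1, foldl_dedup]
  simp

lemma dd_filter_aux (p : String → Bool) :
    ∀ (N : Nat) (l : List String), l.length ≤ N → (dd l).filter p = dd (l.filter p) := by
  intro N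
  induction N with
  | zero =>
    intro l hl
    have : l = [] := by cases l <;> simp_all
    subst this; simp [dd]
  | succ N ih =>
    intro l hl
    cases l with
    | nil => simp [dd]
    | cons n t =>
      have hlt : (t.filter (fun x => decide (x ≠ n))).length ≤ N :=
        le_trans (List.length_filter_le _ _) (by simpa using Nat.le_of_succ_le_succ hl)
      rw [dd, List.filter_cons, List.filter_cons]
      by_cases hp : p n
      · simp only [hp, if_pos]
        rw [dd, ih _ hlt, filter_comm]
      · simp only [hp, if_neg, Bool.false_eq_true, not_false_iff, if_neg hp]
        rw [ih _ hlt, filter_comm]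
        have heq : (t.filter p).filter (fun x => decide (x ≠ n)) = t.filter p := by
          rw [List.filter_eq_self]
          intro x hx
          have hpx := List.of_mem_filter hx
          simp only [decide_eq_true_eq]
          intro hxn; rw [hxn] at hpx; simp [hp] at hpx
        rw [heq]

lemma dd_filter (p : String → Bool) (l : List String) : (dd l).filter p = dd (l.filter p) :=
  dd_filter_aux p l.length l le_rfl

lemma rank_getD (n : String) :
    (pvRank.getD n ((["F-G-A", "E-D-A", "E-D-B", "C-G-B"] : List String).length : Int)).toNat = rnk n := by
  have hpv : pvRank = ((((PySem.Dict.empty).insert "F-G-A" (0:Int)).insert "E-D-A" 1).insert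
      "E-D-B" 2).insert "C-G-B" 3 := by rfl
  rw [hpv]
  simp only [PySem.Dict.getD_insert, PySem.Dict.getD_empty]
  unfold rnk
  split_ifs <;> simp_all

lemma filter_eq_singleton (a : String) :
    ∀ (l : List String), l.Nodup → l.filter (fun x => decide (x = a)) = if a ∈ l then [a] else [] := by
  intro l
  induction l with
  | nil => simp
  | cons n t ih =>
    intro hnd
    rcases List.nodup_cons.mp hnd with ⟨hn, hnd'⟩
    by_cases hna : n = a
    · subst hna
      simp [List.filter_cons, ih hnd', hn]
    · have hmem : a ∈ n :: t ↔ a ∈ t := by simp [Ne.symm hna]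
      simp [List.filter_cons, hna, ih hnd', hmem]

lemma rnk0 (x : String) : rnk x = 0 ↔ x = "F-G-A" := by unfold rnk; split_ifs <;> simp_all
lemma rnk1 (x : String) : rnk x = 1 ↔ x = "E-D-A" := by unfold rnk; split_ifs <;> simp_all
lemma rnk2 (x : String) : rnk x = 2 ↔ x = "E-D-B" := by unfold rnk; split_ifs <;> simp_all
lemma rnk3 (x : String) : rnk x = 3 ↔ x = "C-G-B" := by unfold rnk; split_ifs <;> simp_all
lemma rnk4 (x : String) :
    rnk x = 4 ↔ x ∉ (["F-G-A", "E-D-A", "E-D-B", "C-G-B"] : List String) := by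
  unfold rnk; split_ifs <;> simp_all

lemma bucket_fold :
    ∀ (l : List String) (a b c d e : List String),
      l.foldl bstep [a, b, c, d, e]
        = [a ++ filt 0 l, b ++ filt 1 l, c ++ filt 2 l, d ++ filt 3 l, e ++ filt 4 l] := by
  intro l
  induction l with
  | nil => simp [filt]
  | cons n t ih =>
    intro a b c d e
    simp only [List.foldl_cons]
    by_cases h0 : n = "F-G-A"
    · subst h0
      rw [show bstep [a,b,c,d,e] "F-G-A" = [a ++ ["F-G-A"], b, c, d, e] from rfl, ih]
      simp [filt, List.filter_cons, rnk]
    · by_cases h1 : n = "E-D-A"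
      · subst h1
        rw [show bstep [a,b,c,d,e] "E-D-A" = [a, b ++ ["E-D-A"], c, d, e] from rfl, ih]
        simp [filt, List.filter_cons, rnk]
      · by_cases h2 : n = "E-D-B"
        · subst h2
          rw [show bstep [a,b,c,d,e] "E-D-B" = [a, b, c ++ ["E-D-B"], d, e] from rfl, ih]
          simp [filt, List.filter_cons, rnk]
        · by_cases h3 : n = "C-G-B"
          · subst h3
            rw [show bstep [a,b,c,d,e] "C-G-B" = [a, b, c, d ++ ["C-G-B"], e] from rfl, ih]
            simp [filt, List.filter_cons, rnk]
          · have hr : rnk n = 4 := by simp [rnk, h0, h1, h2, h3]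
            rw [show bstep [a,b,c,d,e] n = List.set [a,b,c,d,e] (rnk n)
                (List.getD [a,b,c,d,e] (rnk n) [] ++ [n]) from rfl, hr]
            rw [show List.set [a,b,c,d,e] 4 (List.getD [a,b,c,d,e] 4 [] ++ [n])
                = [a, b, c, d, e ++ [n]] from rfl, ih]
            have f0 : filt 0 (n :: t) = filt 0 t := by
              simp [filt, List.filter_cons, hr]
            have f1 : filt 1 (n :: t) = filt 1 t := by
              simp [filt, List.filter_cons, hr]
            have f2 : filt 2 (n :: t) = filt 2 t := by
              simp [filt, List.filter_cons, hr]
            have f3 : filt 3 (n :: t) = filt 3 t := by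
              simp [filt, List.filter_cons, hr]
            have f4 : filt 4 (n :: t) = n :: filt 4 t := by
              simp [filt, List.filter_cons, hr]
            rw [f0, f1, f2, f3, f4]
            simp

lemma main_eq (groups : List String) :
    order_sequence_labels_py groups = order_sequence_labels_py_alt groups := by
  -- A side
  have hA : order_sequence_labels_py groups
      = ((["F-G-A", "E-D-A", "E-D-B", "C-G-B"] : List String).filter (fun n => decide (n ∈ groups)))
        ++ dd (groups.filter (fun x => !decide (x ∈ (["F-G-A", "E-D-A", "E-D-B", "C-G-B"] : List String)))) := by
    show groups.foldl (fun labels name => if name ∈ labels then labels else labels ++ [name])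
        ((["F-G-A", "E-D-A", "E-D-B", "C-G-B"] : List String).foldl
          (fun labels name => if name ∈ groups then labels ++ [name] else labels) [])
      = _
    rw [foldl_pref groups, List.nil_append, foldl_dedup]
    congr 1
    congr 1
    apply List.filter_congr
    intro x hx
    by_cases hp : x ∈ (["F-G-A", "E-D-A", "E-D-B", "C-G-B"] : List String)
    · have hmem : x ∈ List.filter (fun n => decide (n ∈ groups)) ["F-G-A", "E-D-A", "E-D-B", "C-G-B"] :=
        List.mem_filter.mpr ⟨hp, by simpa using hx⟩
      simp [hmem, hp]
    · have hmem : x ∉ List.filter (fun n => decide (n ∈ groups)) ["F-G-A", "E-D-A", "E-D-B", "C-G-B"] :=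
        fun hc => hp (List.mem_filter.mp hc).1
      simp [hmem, hp]
  -- B side
  have hB : order_sequence_labels_py_alt groups
      = filt 0 (PySem.List.dedup groups) ++ (filt 1 (PySem.List.dedup groups)
        ++ (filt 2 (PySem.List.dedup groups) ++ (filt 3 (PySem.List.dedup groups)
        ++ filt 4 (PySem.List.dedup groups)))) := by
    show ((PySem.List.dedup groups).foldl
        (fun bs name =>
          let k := (pvRank.getD name ((["F-G-A", "E-D-A", "E-D-B", "C-G-B"] : List String).length : Int)).toNat
          bs.set k (bs.getD k [] ++ [name]))
        [[], [], [], [], []]).foldl (fun acc bucket => acc ++ bucket) [] = _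
    have hfun : (fun (bs : List (List String)) (name : String) =>
        let k := (pvRank.getD name ((["F-G-A", "E-D-A", "E-D-B", "C-G-B"] : List String).length : Int)).toNat
        bs.set k (bs.getD k [] ++ [name])) = bstep := by
      funext bs name
      simp only [rank_getD, bstep]
    rw [hfun, bucket_fold]
    simp [List.append_assoc]
  rw [hA, hB]
  have hnd := PySem.List.nodup_dedup (α := String) groups
  have h0 : filt 0 (PySem.List.dedup groups) = if "F-G-A" ∈ groups then ["F-G-A"] else [] := by
    have hc : filt 0 (PySem.List.dedup groups)
        = (PySem.List.dedup groups).filter (fun x => decide (x = "F-G-A")) := by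
      apply List.filter_congr; intro x _; simp [rnk0]
    rw [hc, filter_eq_singleton _ _ hnd]
    simp [PySem.List.mem_dedup]
  have h1 : filt 1 (PySem.List.dedup groups) = if "E-D-A" ∈ groups then ["E-D-A"] else [] := by
    have hc : filt 1 (PySem.List.dedup groups)
        = (PySem.List.dedup groups).filter (fun x => decide (x = "E-D-A")) := by
      apply List.filter_congr; intro x _; simp [rnk1]
    rw [hc, filter_eq_singleton _ _ hnd]
    simp [PySem.List.mem_dedup]
  have h2 : filt 2 (PySem.List.dedup groups) = if "E-D-B" ∈ groups then ["E-D-B"] else [] := by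
    have hc : filt 2 (PySem.List.dedup groups)
        = (PySem.List.dedup groups).filter (fun x => decide (x = "E-D-B")) := by
      apply List.filter_congr; intro x _; simp [rnk2]
    rw [hc, filter_eq_singleton _ _ hnd]
    simp [PySem.List.mem_dedup]
  have h3 : filt 3 (PySem.List.dedup groups) = if "C-G-B" ∈ groups then ["C-G-B"] else [] := by
    have hc : filt 3 (PySem.List.dedup groups)
        = (PySem.List.dedup groups).filter (fun x => decide (x = "C-G-B")) := by
      apply List.filter_congr; intro x _; simp [rnk3]
    rw [hc, filter_eq_singleton _ _ hnd]
    simp [PySem.List.mem_dedup]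
  have h4 : filt 4 (PySem.List.dedup groups)
      = dd (groups.filter (fun x => !decide (x ∈ (["F-G-A", "E-D-A", "E-D-B", "C-G-B"] : List String)))) := by
    have hc : filt 4 (PySem.List.dedup groups)
        = (PySem.List.dedup groups).filter
            (fun x => !decide (x ∈ (["F-G-A", "E-D-A", "E-D-B", "C-G-B"] : List String))) := by
      apply List.filter_congr; intro x _; simp [rnk4]
    rw [hc, dedup_eq_dd, dd_filter]
  rw [h0, h1, h2, h3, h4]
  by_cases g0 : "F-G-A" ∈ groups <;> by_cases g1 : "E-D-A" ∈ groups <;>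
    by_cases g2 : "E-D-B" ∈ groups <;> by_cases g3 : "C-G-B" ∈ groups <;>
    simp [List.filter_cons, g0, g1, g2, g3]

-- ===== VERDICT (by name: the statement is the Claim_ definition above) =====
theorem order_sequence_labels_py_spec : Claim_equal_order_sequence_labels_py := by
  intro groups _
  unfold Spec_order_sequence_labels_py
  exact main_eq groups
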